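-- pv_equiv track=rewrite | github.com/jdolan-exalink/OpenVMS | backend/app/plugins/enterprise/epp/plugin.py | _severity_for
-- ===== SOURCE A (Python) =====
-- def _severity_for(missing: list[str]) -> str:
--     if "harness" in missing:
--         return "critical"
--     if "helmet" in missing or "goggles" in missing:
--         return "high"
--     if any(item in missing for item in ("vest", "gloves", "boots", "mask")):
--         return "medium"
--     return "low"
-- ===== SOURCE B (Python) =====
-- _RANK = {"vest": 1, "gloves": 1, "boots": 1, "mask": 1,
--          "helmet": 2, "goggles": 2, "harness": 3}
-- _NAMES = ("low", "medium", "high", "critical")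
--
--
-- def _severity_for(missing: list[str]) -> str:
--     worst = 0
--     for item in missing:
--         worst = max(worst, _RANK.get(item, 0))
--     return _NAMES[worst]
-- ===== Notes on version B (the rewrite author's own statement) =====
-- stated objective: alternative
-- what changed: Instead of A's cascade of per-keyword membership scans over the list, B makes a single pass over missing accumulating the maximum severity rank from a rank dict and indexes a names table with it.
import Mathlib
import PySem

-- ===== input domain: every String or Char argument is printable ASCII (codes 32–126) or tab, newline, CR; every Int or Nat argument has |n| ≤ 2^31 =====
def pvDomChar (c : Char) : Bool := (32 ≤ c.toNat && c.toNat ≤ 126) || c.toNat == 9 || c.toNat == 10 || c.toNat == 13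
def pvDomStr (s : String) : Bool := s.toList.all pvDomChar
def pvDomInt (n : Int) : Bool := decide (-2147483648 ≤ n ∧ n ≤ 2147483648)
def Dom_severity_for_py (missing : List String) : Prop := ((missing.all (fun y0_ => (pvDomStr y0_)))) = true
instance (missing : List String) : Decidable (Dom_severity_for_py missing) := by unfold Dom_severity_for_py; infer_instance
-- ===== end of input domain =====

set_option maxHeartbeats 1000000


-- B replaces A's per-keyword membership scans by a single pass over `missing`
-- accumulating the maximum severity rank, then indexing a names table (objective: alternative).

-- ===== PORT A =====
def severity_for_py (missing : List String) : String :=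
  if "harness" ∈ missing then "critical"
  else if "helmet" ∈ missing ∨ "goggles" ∈ missing then "high"
  else if ["vest", "gloves", "boots", "mask"].any (fun item => item ∈ missing) then "medium"
  else "low"

-- ===== PORT B =====
def pvRankDict : PySem.Dict String Nat :=
  PySem.Dict.mk
  [("vest", 1), ("gloves", 1), ("boots", 1), ("mask", 1),
   ("helmet", 2), ("goggles", 2), ("harness", 3)]

def pvNames : List String := ["low", "medium", "high", "critical"]

def severity_for_py_alt (missing : List String) : String :=
  let worst := missing.foldl (fun w item => max w (PySem.Dict.getD pvRankDict item 0)) 0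
  (PySem.List.pyGet? pvNames (worst : Int)).getD ""

-- ===== PRECONDITION & SPEC =====
def Spec_severity_for_py (missing : List String) (out : String) : Prop := out = severity_for_py_alt missing
instance (missing : List String) (out : String) : Decidable (Spec_severity_for_py missing out) := by unfold Spec_severity_for_py; infer_instance

-- ===== CLAIM (what is proved, stated in full; the proofs are below) =====
def Claim_equal_severity_for_py : Prop := ∀ (missing : List String), Dom_severity_for_py missing → Spec_severity_for_py missing (severity_for_py missing)

-- ===== LEMMAS AND PROOFS =====

def pvRank (s : String) : Nat := PySem.Dict.getD pvRankDict s 0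

theorem pvRank_spec (s : String) :
    pvRank s = (if "harness" = s then 3
      else if "helmet" = s ∨ "goggles" = s then 2
      else if "vest" = s ∨ "gloves" = s ∨ "boots" = s ∨ "mask" = s then 1 else 0) := by
  simp only [pvRank, pvRankDict, PySem.Dict.getD_eq_get?_getD, PySem.Dict.get?_mk_cons,
    beq_iff_eq]
  split_ifs <;> subst_vars <;> simp_all [PySem.Dict.get?]

theorem pvRank_foldl_shift (l : List String) (a : Nat) :
    l.foldl (fun w item => max w (pvRank item)) a
      = max a (l.foldl (fun w item => max w (pvRank item)) 0) := by
  induction l generalizing a with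
  | nil => simp
  | cons s l ih =>
    simp only [List.foldl_cons]
    rw [ih (max a (pvRank s)), ih (max 0 (pvRank s))]
    omega

theorem pvWorst_char (l : List String) :
    l.foldl (fun w item => max w (pvRank item)) 0
      = (if "harness" ∈ l then 3
         else if "helmet" ∈ l ∨ "goggles" ∈ l then 2
         else if "vest" ∈ l ∨ "gloves" ∈ l ∨ "boots" ∈ l ∨ "mask" ∈ l then 1
         else 0) := by
  induction l with
  | nil => simp
  | cons s l ih =>
    have h : (s :: l).foldl (fun w item => max w (pvRank item)) 0
        = max (pvRank s) (l.foldl (fun w item => max w (pvRank item)) 0) := by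
      simp only [List.foldl_cons, Nat.zero_max]
      exact pvRank_foldl_shift l (pvRank s)
    rw [h, ih, pvRank_spec s]
    simp only [List.mem_cons]
    split_ifs <;> first | omega | tauto

-- ===== VERDICT (by name: the statement is the Claim_ definition above) =====
theorem severity_for_py_spec : Claim_equal_severity_for_py := by
  intro missing _
  unfold Spec_severity_for_py severity_for_py severity_for_py_alt
  have h := pvWorst_char missing
  simp only [pvRank] at h
  rw [h]
  simp only [List.any_cons, List.any_nil, Bool.or_eq_true, decide_eq_true_eq]
  split_ifs <;> tauto
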